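-- pv_equiv track=rewrite | github.com/Ronny884/Parser-of-3-websites | form_changer.py | change_clinic_work_hours_form
-- ===== SOURCE A (Python) =====
-- def change_clinic_work_hours_form(input_string):
--     input_string = input_string.replace('Horario: ', '')
--     input_string = input_string.replace('\r\n', ' ')
--     input_string = input_string.replace(' a ', '-')
--     replacements = {
--         'L': 'mon',
--         'M': 'tue',
--         'J': 'thu',
--         'V': 'fri',
--         'S': 'sat',
--         'D': 'sun'
--     }
--     output_string = ''
--     repeated_M = False
--     for char in input_string:
--         if char in replacements:
--             if char == 'M' and repeated_M:
--                 output_string += 'Wed'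
--             else:
--                 output_string += replacements[char]
--                 if char == 'M':
--                     repeated_M = True
--         else:
--             output_string += char
--
--     return [output_string.strip()]
-- ===== SOURCE B (Python) =====
-- def change_clinic_work_hours_form(input_string):
--     s = input_string.replace('Horario: ', '').replace('\r\n', ' ').replace(' a ', '-')
--     table = {
--         'L': 'mon',
--         'M': 'tue',
--         'J': 'thu',
--         'V': 'fri',
--         'S': 'sat',
--         'D': 'sun'
--     }
--     i = s.find('M')
--     head = ''.join(table.get(c, c) for c in s[:i + 1])
--     tail = ''.join('Wed' if c == 'M' else table.get(c, c) for c in s[i + 1:])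
--     return [(head + tail).strip()]
-- ===== Notes on version B (the rewrite author's own statement) =====
-- stated objective: idiomatic
-- what changed: The stateful character loop with its repeated_M flag is replaced by locating the first tuesday-letter with str.find and mapping the two halves of the string statelessly (dict.get per char on the first half, the wednesday word for that letter on the second), joined and stripped.
import Mathlib
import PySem

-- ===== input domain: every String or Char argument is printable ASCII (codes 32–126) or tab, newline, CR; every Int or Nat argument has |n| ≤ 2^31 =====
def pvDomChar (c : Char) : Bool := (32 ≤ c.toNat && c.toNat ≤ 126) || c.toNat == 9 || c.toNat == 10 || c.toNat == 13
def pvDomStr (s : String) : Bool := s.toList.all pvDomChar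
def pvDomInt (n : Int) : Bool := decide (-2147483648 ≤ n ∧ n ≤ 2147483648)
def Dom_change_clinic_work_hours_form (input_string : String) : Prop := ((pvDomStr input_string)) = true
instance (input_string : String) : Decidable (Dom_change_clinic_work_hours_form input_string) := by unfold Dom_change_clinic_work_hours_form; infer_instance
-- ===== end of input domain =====

-- B replaces A's stateful character loop (repeated_M flag) by finding the first 'M' and
-- mapping the two halves statelessly (objective: idiomatic, same cost).

-- ===== PORT A =====
-- A's dict 'replacements'
def pvReplacements : PySem.Dict Char (List Char) :=
  PySem.Dict.mk [('L', ['m','o','n']), ('M', ['t','u','e']), ('J', ['t','h','u']),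
                 ('V', ['f','r','i']), ('S', ['s','a','t']), ('D', ['s','u','n'])]

-- one iteration of A's for-loop: state = (output_string, repeated_M)
def pvStepA (acc : List Char × Bool) (c : Char) : List Char × Bool :=
  if pvReplacements.contains c then
    if c = 'M' ∧ acc.2 then (acc.1 ++ ['W','e','d'], acc.2)
    else (acc.1 ++ pvReplacements.getD c [], if c = 'M' then true else acc.2)
  else (acc.1 ++ [c], acc.2)

def change_clinic_work_hours_form (input_string : String) : List String :=
  let s1 := PySem.Str.replace input_string "Horario: " ""
  let s2 := PySem.Str.replace s1 "\r\n" " "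
  let s3 := PySem.Str.replace s2 " a " "-"
  let r := s3.toList.foldl pvStepA ([], false)
  [String.mk (PySem.Chars.strip r.1)]

-- ===== PORT B =====
-- B's dict 'table'
def pvTable : PySem.Dict Char (List Char) :=
  PySem.Dict.mk [('L', ['m','o','n']), ('M', ['t','u','e']), ('J', ['t','h','u']),
                 ('V', ['f','r','i']), ('S', ['s','a','t']), ('D', ['s','u','n'])]

def change_clinic_work_hours_form_alt (input_string : String) : List String :=
  let s1 := PySem.Str.replace input_string "Horario: " ""
  let s2 := PySem.Str.replace s1 "\r\n" " "
  let s3 := PySem.Str.replace s2 " a " "-"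
  let cs := s3.toList
  let i := PySem.Chars.find cs ['M']
  let head := (PySem.List.slice cs none (some (i + 1))).flatMap (fun c => pvTable.getD c [c])
  let tail := (PySem.List.slice cs (some (i + 1)) none).flatMap
                (fun c => if c = 'M' then ['W','e','d'] else pvTable.getD c [c])
  [String.mk (PySem.Chars.strip (head ++ tail))]

-- ===== PRECONDITION & SPEC =====
def Spec_change_clinic_work_hours_form (input_string : String) (out : List String) : Prop := out = change_clinic_work_hours_form_alt input_string
instance (input_string : String) (out : List String) : Decidable (Spec_change_clinic_work_hours_form input_string out) := by unfold Spec_change_clinic_work_hours_form; infer_instance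

-- ===== CLAIM (what is proved, stated in full; the proofs are below) =====
def Claim_equal_change_clinic_work_hours_form : Prop := ∀ (input_string : String), Dom_change_clinic_work_hours_form input_string → Spec_change_clinic_work_hours_form input_string (change_clinic_work_hours_form input_string)

-- ===== LEMMAS AND PROOFS =====

-- B's per-char maps, named for the proofs
def pvF1 (c : Char) : List Char := pvTable.getD c [c]
def pvF2 (c : Char) : List Char := if c = 'M' then ['W','e','d'] else pvTable.getD c [c]

lemma pvStepA_true (out : List Char) (c : Char) :
    pvStepA (out, true) c = (out ++ pvF2 c, true) := by
  by_cases h1 : c = 'L'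
  · subst h1; simp [pvStepA, pvF2, pvReplacements, pvTable, PySem.Dict.contains, PySem.Dict.getD, PySem.Dict.get?]
  by_cases h2 : c = 'M'
  · subst h2; simp [pvStepA, pvF2, pvReplacements, PySem.Dict.contains]
  by_cases h3 : c = 'J'
  · subst h3; simp [pvStepA, pvF2, pvReplacements, pvTable, PySem.Dict.contains, PySem.Dict.getD, PySem.Dict.get?]
  by_cases h4 : c = 'V'
  · subst h4; simp [pvStepA, pvF2, pvReplacements, pvTable, PySem.Dict.contains, PySem.Dict.getD, PySem.Dict.get?]
  by_cases h5 : c = 'S'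
  · subst h5; simp [pvStepA, pvF2, pvReplacements, pvTable, PySem.Dict.contains, PySem.Dict.getD, PySem.Dict.get?]
  by_cases h6 : c = 'D'
  · subst h6; simp [pvStepA, pvF2, pvReplacements, pvTable, PySem.Dict.contains, PySem.Dict.getD, PySem.Dict.get?]
  · simp [pvStepA, pvF2, pvReplacements, pvTable, PySem.Dict.contains, PySem.Dict.getD, PySem.Dict.get?,
          Ne.symm h1, Ne.symm h2, Ne.symm h3, Ne.symm h4, Ne.symm h5, Ne.symm h6, h2]

lemma pvStepA_false_notM (out : List Char) (c : Char) (hM : c ≠ 'M') :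
    pvStepA (out, false) c = (out ++ pvF1 c, false) := by
  by_cases h1 : c = 'L'
  · subst h1; simp [pvStepA, pvF1, pvReplacements, pvTable, PySem.Dict.contains, PySem.Dict.getD, PySem.Dict.get?]
  by_cases h3 : c = 'J'
  · subst h3; simp [pvStepA, pvF1, pvReplacements, pvTable, PySem.Dict.contains, PySem.Dict.getD, PySem.Dict.get?]
  by_cases h4 : c = 'V'
  · subst h4; simp [pvStepA, pvF1, pvReplacements, pvTable, PySem.Dict.contains, PySem.Dict.getD, PySem.Dict.get?]
  by_cases h5 : c = 'S'
  · subst h5; simp [pvStepA, pvF1, pvReplacements, pvTable, PySem.Dict.contains, PySem.Dict.getD, PySem.Dict.get?]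
  by_cases h6 : c = 'D'
  · subst h6; simp [pvStepA, pvF1, pvReplacements, pvTable, PySem.Dict.contains, PySem.Dict.getD, PySem.Dict.get?]
  · simp [pvStepA, pvF1, pvReplacements, pvTable, PySem.Dict.contains, PySem.Dict.getD, PySem.Dict.get?,
          Ne.symm h1, Ne.symm hM, Ne.symm h3, Ne.symm h4, Ne.symm h5, Ne.symm h6]

lemma pvStepA_false_M (out : List Char) :
    pvStepA (out, false) 'M' = (out ++ ['t','u','e'], true) := by
  simp [pvStepA, pvReplacements, PySem.Dict.contains, PySem.Dict.getD, PySem.Dict.get?]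

lemma pvFoldA_true (cs : List Char) (out : List Char) :
    cs.foldl pvStepA (out, true) = (out ++ cs.flatMap pvF2, true) := by
  induction cs generalizing out with
  | nil => simp
  | cons c cs ih => simp [pvStepA_true, ih]

lemma pvFoldA_false_noM (cs : List Char) (out : List Char) (h : 'M' ∉ cs) :
    cs.foldl pvStepA (out, false) = (out ++ cs.flatMap pvF1, false) := by
  induction cs generalizing out with
  | nil => simp
  | cons c cs ih =>
    simp only [List.mem_cons, not_or] at h
    rw [List.foldl_cons, pvStepA_false_notM _ _ (fun hc => h.1 hc.symm), ih _ h.2]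
    simp

lemma pvFlatMap_noM (cs : List Char) (h : 'M' ∉ cs) :
    cs.flatMap pvF2 = cs.flatMap pvF1 := by
  induction cs with
  | nil => simp
  | cons c cs ih =>
    simp only [List.mem_cons, not_or] at h
    have hc : c ≠ 'M' := fun e => h.1 e.symm
    simp [List.flatMap_cons, pvF2, pvF1, hc, ih h.2]

lemma pvF1_M : pvF1 'M' = ['t','u','e'] := by
  simp [pvF1, pvTable, PySem.Dict.getD, PySem.Dict.get?]

-- main: A's fold over cs equals B's split-at-first-M formulation
lemma pvMain (cs : List Char) :
    (cs.foldl pvStepA ([], false)).1 =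
      (PySem.List.slice cs none (some (PySem.Chars.find cs ['M'] + 1))).flatMap pvF1 ++
      (PySem.List.slice cs (some (PySem.Chars.find cs ['M'] + 1)) none).flatMap pvF2 := by
  by_cases hin : ['M'] <:+: cs
  · -- there is a first 'M'
    have hk0 : 0 ≤ PySem.Chars.find cs ['M'] := (PySem.Chars.find_nonneg_iff cs ['M']).mpr hin
    have hkne : PySem.Chars.findFrom cs ['M'] 0 ≠ -1 := by
      rw [PySem.Chars.findFrom_zero]; omega
    obtain ⟨-, hpre, hmin⟩ :=
      PySem.Chars.findFrom_natCast_spec cs ['M'] 0 (Nat.zero_le _) (by simpa using hkne)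
    simp only [Nat.cast_zero, PySem.Chars.findFrom_zero] at hpre hmin
    set n := (PySem.Chars.find cs ['M']).toNat with hn
    have hkn : PySem.Chars.find cs ['M'] = (n : Int) := by omega
    have hklen : PySem.Chars.find cs ['M'] ≤ cs.length := PySem.Chars.find_le_length cs ['M']
    -- the prefix fact gives n < length and cs[n] = 'M'
    have hlt : n < cs.length := by
      by_contra hge
      have : cs.drop n = [] := List.drop_eq_nil_of_le (by omega)
      rw [this] at hpre
      simpa using List.eq_nil_of_prefix_nil hpre
    have hM : cs[n] = 'M' := by
      have := List.IsPrefix.getElem hpre (i := 0) (by simp)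
      simpa [List.getElem_drop] using this.symm
    have hnoM : 'M' ∉ cs.take n := by
      intro hmem
      obtain ⟨j, hj, hje⟩ := List.mem_take_iff_getElem.mp hmem
      have hjn : j < n := lt_of_lt_of_le hj (min_le_left _ _)
      refine hmin j (Nat.zero_le _) hjn ?_
      have : cs.drop j = cs[j] :: cs.drop (j+1) := List.drop_eq_getElem_cons (by omega)
      rw [this, hje]
      exact ⟨cs.drop (j+1), rfl⟩
    -- slices
    have hsl1 : PySem.List.slice cs none (some (PySem.Chars.find cs ['M'] + 1)) = cs.take (n+1) := by
      rw [PySem.List.slice_to cs (by omega)]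
      congr 1; omega
    have hsl2 : PySem.List.slice cs (some (PySem.Chars.find cs ['M'] + 1)) none = cs.drop (n+1) := by
      rw [PySem.List.slice_from cs (by omega)]
      congr 1; omega
    -- decompose cs
    have hdec : cs = cs.take n ++ 'M' :: cs.drop (n+1) := by
      conv_lhs => rw [← List.take_append_drop n cs]
      rw [List.drop_eq_getElem_cons hlt, hM]
    have htk : cs.take (n+1) = cs.take n ++ ['M'] := by
      rw [List.take_succ]
      simp [List.getElem?_eq_getElem hlt, hM]
    calc (cs.foldl pvStepA ([], false)).1
        = ((cs.take n ++ 'M' :: cs.drop (n+1)).foldl pvStepA ([], false)).1 := by rw [← hdec]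
      _ = (cs.take n).flatMap pvF1 ++ ['t','u','e'] ++ (cs.drop (n+1)).flatMap pvF2 := by
          rw [List.foldl_append, pvFoldA_false_noM _ _ hnoM, List.foldl_cons,
              pvStepA_false_M, pvFoldA_true]
          simp
      _ = _ := by
          rw [hsl1, hsl2, htk]
          simp [pvF1_M]
  · -- no 'M' anywhere
    have hk : PySem.Chars.find cs ['M'] = -1 := (PySem.Chars.find_eq_neg_one_iff cs ['M']).mpr hin
    have hnoM : 'M' ∉ cs := by
      intro hmem
      obtain ⟨s, t, rfl⟩ := List.mem_iff_append.mp hmem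
      exact hin ⟨s, t, by simp⟩
    have hsl1 : PySem.List.slice cs none (some (PySem.Chars.find cs ['M'] + 1)) = [] := by
      rw [hk]; norm_num [PySem.List.slice_to cs (le_refl (0:Int))]
    have hsl2 : PySem.List.slice cs (some (PySem.Chars.find cs ['M'] + 1)) none = cs := by
      rw [hk]; norm_num [PySem.List.slice_from cs (le_refl (0:Int))]
    rw [hsl1, hsl2, pvFoldA_false_noM _ _ hnoM, pvFlatMap_noM _ hnoM]
    simp

-- ===== VERDICT (by name: the statement is the Claim_ definition above) =====
theorem change_clinic_work_hours_form_spec : Claim_equal_change_clinic_work_hours_form := by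
  intro s _
  unfold Spec_change_clinic_work_hours_form change_clinic_work_hours_form change_clinic_work_hours_form_alt
  simp only []
  rw [show (fun c => pvTable.getD c [c]) = pvF1 from rfl,
      show (fun c => if c = 'M' then ['W','e','d'] else pvTable.getD c [c]) = pvF2 from rfl,
      pvMain]
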